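-- pv_equiv track=rewrite | github.com/atanasbakalov/Programming0-1 | week 4/9-0-Winter-Is-Coming/winter_coming.py | winter_is_coming
-- ===== SOURCE A (Python) =====
-- def winter_is_coming(seasons):
--
--     counter = 0
--
--     for season in seasons:
--
--         if season == "winter":
--
--             counter = 0
--
--         else:
--
--             counter += 1
--
--     if counter >= 5:
--
--         return "Winter is comming !"
--
--     else:
--
--         return "You'll have to wait a bit !"
-- ===== SOURCE B (Python) =====
-- def winter_is_coming(seasons):
--     try:
--         trailing = seasons[::-1].index("winter")
--     except ValueError:
--         trailing = len(seasons)
--     return "Winter is comming !" if trailing >= 5 else "You'll have to wait a bit !"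
-- ===== Notes on version B (the rewrite author's own statement) =====
-- stated objective: alternative
-- what changed: Replaces the forward accumulate-and-reset counter pass with locating the last 'winter' via the index of the first 'winter' in the reversed list and comparing that suffix length to 5.
import Mathlib
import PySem

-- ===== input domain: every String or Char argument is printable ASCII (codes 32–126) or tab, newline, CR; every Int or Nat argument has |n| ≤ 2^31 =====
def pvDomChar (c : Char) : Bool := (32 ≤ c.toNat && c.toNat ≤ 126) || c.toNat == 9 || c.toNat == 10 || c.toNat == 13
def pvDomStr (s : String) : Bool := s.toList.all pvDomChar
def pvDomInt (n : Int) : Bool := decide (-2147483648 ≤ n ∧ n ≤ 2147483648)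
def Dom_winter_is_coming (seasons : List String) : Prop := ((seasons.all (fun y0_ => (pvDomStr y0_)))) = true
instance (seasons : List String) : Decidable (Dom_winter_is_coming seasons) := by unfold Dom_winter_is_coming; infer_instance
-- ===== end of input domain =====

-- B locates the last "winter" (index of the first "winter" in the reversed list) and
-- compares the suffix length to 5, instead of A's accumulate-and-reset counter pass.

-- ===== PORT A =====
def winter_is_coming (seasons : List String) : String :=
  let counter : Int := seasons.foldl (fun c season => if season = "winter" then 0 else c + 1) 0
  if counter ≥ 5 then "Winter is comming !" else "You'll have to wait a bit !"

-- ===== PORT B =====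
def winter_is_coming_alt (seasons : List String) : String :=
  -- seasons[::-1] is List.reverse; .index with try/except ValueError is index? with a default
  let trailing : Nat :=
    match PySem.List.index? seasons.reverse "winter" with
    | some i => i
    | none => seasons.length
  if trailing ≥ 5 then "Winter is comming !" else "You'll have to wait a bit !"

-- ===== PRECONDITION & SPEC =====
def Spec_winter_is_coming (seasons : List String) (out : String) : Prop := out = winter_is_coming_alt seasons
instance (seasons : List String) (out : String) : Decidable (Spec_winter_is_coming seasons out) := by unfold Spec_winter_is_coming; infer_instance

-- ===== CLAIM (what is proved, stated in full; the proofs are below) =====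
def Claim_equal_winter_is_coming : Prop := ∀ (seasons : List String), Dom_winter_is_coming seasons → Spec_winter_is_coming seasons (winter_is_coming seasons)

-- ===== LEMMAS AND PROOFS =====

-- A's counter equals the number of seasons after the last "winter" (plus the initial
-- value when no "winter" occurs), phrased via the first "winter" in the reversed list.
theorem winter_counter_eq (l : List String) (c : Int) :
    l.foldl (fun c season => if season = "winter" then 0 else c + 1) c =
    (match PySem.List.index? l.reverse "winter" with
     | some i => (i : Int)
     | none => c + l.length) := by
  induction l using List.reverseRecOn with
  | nil => simp [PySem.List.index?_eq_idxOf?]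
  | append_singleton l s ih =>
      rw [List.foldl_append]
      by_cases hs : s = "winter"
      · subst hs
        simp [PySem.List.index?_eq_idxOf?, List.idxOf?_cons]
      · have h1 : PySem.List.index? ((l ++ [s]).reverse) "winter"
            = (PySem.List.index? l.reverse "winter").map (· + 1) := by
          rw [List.reverse_append, List.reverse_singleton, List.singleton_append,
            PySem.List.index?_cons_of_ne _ hs]
        simp only [List.foldl_cons, List.foldl_nil, if_neg hs, ih, h1]
        cases PySem.List.index? l.reverse "winter" with
        | none => simp; ring
        | some i => simp

-- ===== VERDICT (by name: the statement is the Claim_ definition above) =====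
theorem winter_is_coming_spec : Claim_equal_winter_is_coming := by
  intro seasons _
  unfold Spec_winter_is_coming winter_is_coming winter_is_coming_alt
  rw [winter_counter_eq]
  cases h : PySem.List.index? seasons.reverse "winter" with
  | none =>
      simp only []
      by_cases h5 : seasons.length ≥ 5
      · rw [if_pos (by rw [zero_add]; exact_mod_cast h5), if_pos h5]
      · rw [if_neg (by rw [zero_add]; exact_mod_cast h5), if_neg h5]
  | some i =>
      simp only []
      by_cases h5 : i ≥ 5
      · rw [if_pos (by exact_mod_cast h5), if_pos h5]
      · rw [if_neg (by exact_mod_cast h5), if_neg h5]
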